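-- pv_equiv track=rewrite | github.com/zhenfelix/OnlineJudgeCodings | LeetCode/力扣杯/LCP 61. 气温变化趋势.py | temperatureTrend
-- ===== SOURCE A (Python) =====
-- from typing import List
--
-- def temperatureTrend(temperatureA: List[int], temperatureB: List[int]) -> int:
--     n = len(temperatureA)
--     cnt, ans = 0, 0
--     for i in range(1,n):
--         a = temperatureA[i]-temperatureA[i-1]
--         b = temperatureB[i]-temperatureB[i-1]
--         if (a == b == 0) or (a > 0 and b > 0) or (a < 0 and b < 0):
--             cnt += 1
--             ans = max(ans, cnt)
--         else:
--             cnt = 0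
--     return ans
-- ===== SOURCE B (Python) =====
-- from typing import List
--
-- def temperatureTrend(temperatureA: List[int], temperatureB: List[int]) -> int:
--     def sign(x):
--         return (x > 0) - (x < 0)
--     matches = [sign(temperatureA[i] - temperatureA[i - 1]) == sign(temperatureB[i] - temperatureB[i - 1])
--                for i in range(1, len(temperatureA))]
--     n = len(matches)
--     best, i = 0, 0
--     while i <= n:
--         k = next((t for t in range(i, n) if not matches[t]), n) - i
--         best = max(best, k)
--         i += k + 1
--     return best
-- ===== Notes on version B (the rewrite author's own statement) =====
-- stated objective: alternative
-- what changed: B first builds the list of per-step trend-match booleans (comparing three-way signs of adjacent differences) and then takes the maximum run length by a run-splitting scan that jumps from one mismatch to the next, instead of A's single indexed loop with a running counter that resets.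
import Mathlib
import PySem

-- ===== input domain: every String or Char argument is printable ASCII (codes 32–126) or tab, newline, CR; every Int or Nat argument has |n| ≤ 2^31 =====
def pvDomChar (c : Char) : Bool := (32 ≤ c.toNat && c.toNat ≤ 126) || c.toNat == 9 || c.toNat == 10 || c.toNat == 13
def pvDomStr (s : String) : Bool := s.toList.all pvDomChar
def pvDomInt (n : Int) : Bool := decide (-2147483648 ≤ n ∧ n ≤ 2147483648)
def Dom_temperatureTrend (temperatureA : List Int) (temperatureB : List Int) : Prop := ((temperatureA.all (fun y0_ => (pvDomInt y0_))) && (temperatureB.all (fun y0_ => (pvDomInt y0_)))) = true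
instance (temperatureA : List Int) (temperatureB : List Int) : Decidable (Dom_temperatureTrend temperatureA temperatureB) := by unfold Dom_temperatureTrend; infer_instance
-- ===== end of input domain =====

-- B rebuilds the task as: per-step trend-match booleans (three-way signs of adjacent
-- differences), then the max run length by a run-splitting scan that jumps from one
-- mismatch to the next — instead of A's indexed loop with a running counter that resets
-- (objective: alternative).

-- ===== PORT A =====
def temperatureTrend (temperatureA : List Int) (temperatureB : List Int) : Int :=
  (((PySem.List.pyRange 1 (temperatureA.length : Int) 1).foldl (fun (s : Int × Int) i =>
    if (PySem.List.pyGetD temperatureA i 0 - PySem.List.pyGetD temperatureA (i - 1) 0 =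
          PySem.List.pyGetD temperatureB i 0 - PySem.List.pyGetD temperatureB (i - 1) 0 ∧
        PySem.List.pyGetD temperatureB i 0 - PySem.List.pyGetD temperatureB (i - 1) 0 = 0) ∨
       (PySem.List.pyGetD temperatureA i 0 - PySem.List.pyGetD temperatureA (i - 1) 0 > 0 ∧
        PySem.List.pyGetD temperatureB i 0 - PySem.List.pyGetD temperatureB (i - 1) 0 > 0) ∨
       (PySem.List.pyGetD temperatureA i 0 - PySem.List.pyGetD temperatureA (i - 1) 0 < 0 ∧
        PySem.List.pyGetD temperatureB i 0 - PySem.List.pyGetD temperatureB (i - 1) 0 < 0)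
    then (s.1 + 1, max s.2 (s.1 + 1))
    else (0, s.2)) ((0 : Int), (0 : Int)))).2

-- ===== PORT B =====
-- sign(x) = (x > 0) - (x < 0)
def pySign (x : Int) : Int := (if x > 0 then (1:Int) else 0) - (if x < 0 then (1:Int) else 0)

-- run-splitting loop: jump to the next mismatch, record the run length, repeat.
-- fuel (list length + 1, an upper bound on the iterations since i strictly increases)
-- is a totality guard only.
def loopB (fuel : Nat) (ms : List Bool) (n : Int) (i : Int) (best : Int) : Int :=
  match fuel with
  | 0 => best
  | fuel + 1 =>
    if i ≤ n then
      let k := ((PySem.List.pyRange i n 1).find?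
                  (fun t => !(PySem.List.pyGetD ms t true))).getD n - i
      loopB fuel ms n (i + k + 1) (max best k)
    else best

def temperatureTrend_alt (temperatureA : List Int) (temperatureB : List Int) : Int :=
  let ms := (PySem.List.pyRange 1 (temperatureA.length : Int) 1).map
    (fun i => decide (pySign (PySem.List.pyGetD temperatureA i 0 - PySem.List.pyGetD temperatureA (i - 1) 0) =
                      pySign (PySem.List.pyGetD temperatureB i 0 - PySem.List.pyGetD temperatureB (i - 1) 0)))
  loopB (ms.length + 1) ms (ms.length : Int) 0 0

-- ===== PRECONDITION & SPEC =====
-- Pre_ is exactly the set of inputs on which Python A returns: when 2 ≤ len(temperatureA)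
-- and len(temperatureB) < len(temperatureA), A raises IndexError on temperatureB[i]
-- (and Python B raises the same IndexError there).
def Pre_temperatureTrend (temperatureA : List Int) (temperatureB : List Int) : Prop :=
  temperatureA.length ≤ temperatureB.length ∨ temperatureA.length ≤ 1
instance (temperatureA : List Int) (temperatureB : List Int) : Decidable (Pre_temperatureTrend temperatureA temperatureB) := by unfold Pre_temperatureTrend; infer_instance
def pvWitness_temperatureTrend : List Int × List Int := ([1, 2, 3, 2], [2, 3, 1, 0])

def Spec_temperatureTrend (temperatureA : List Int) (temperatureB : List Int) (out : Int) : Prop := out = temperatureTrend_alt temperatureA temperatureB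
instance (temperatureA : List Int) (temperatureB : List Int) (out : Int) : Decidable (Spec_temperatureTrend temperatureA temperatureB out) := by unfold Spec_temperatureTrend; infer_instance

-- ===== CLAIM (what is proved, stated in full; the proofs are below) =====
def Claim_equal_temperatureTrend : Prop := ∀ (temperatureA : List Int) (temperatureB : List Int), Dom_temperatureTrend temperatureA temperatureB → Pre_temperatureTrend temperatureA temperatureB → Spec_temperatureTrend temperatureA temperatureB (temperatureTrend temperatureA temperatureB)

-- ===== LEMMAS AND PROOFS =====

-- proof-side: the answer as "max leading-run length, recursing past the first mismatch"
def longestRun (fuel : Nat) (ms : List Bool) : Int :=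
  match fuel, ms with
  | _, [] => 0
  | 0, _ => 0
  | fuel + 1, ms =>
    let k := ms.findIdx (fun m => !m)
    max (k : Int) (longestRun fuel (ms.drop (k + 1)))

-- A's loop body condition is exactly "the three-way signs agree".
theorem cond_iff_sign (a b : Int) :
    ((a = b ∧ b = 0) ∨ (a > 0 ∧ b > 0) ∨ (a < 0 ∧ b < 0)) ↔ pySign a = pySign b := by
  unfold pySign; split_ifs <;> omega

-- A's loop step over the precomputed match booleans.
def stepA : (Int × Int) → Bool → (Int × Int)
  | s, true => (s.1 + 1, max s.2 (s.1 + 1))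
  | s, false => (0, s.2)

-- spine of A's counter semantics
def maxRunFrom (cnt : Int) : List Bool → Int
  | [] => 0
  | true :: ms => max (cnt + 1) (maxRunFrom (cnt + 1) ms)
  | false :: ms => maxRunFrom 0 ms

-- first-mismatch position
def lead (ms : List Bool) : Nat := ms.findIdx (fun m => !m)

-- B's longest, with the fuel fixed at the list length
def LR (ms : List Bool) : Int := longestRun ms.length ms

theorem longestRun_congr : ∀ (fuel : Nat), ∀ (ms : List Bool) (fuel' : Nat),
    ms.length ≤ fuel → ms.length ≤ fuel' → longestRun fuel ms = longestRun fuel' ms := by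
  intro fuel
  induction fuel with
  | zero =>
    intro ms fuel' h _
    have : ms = [] := List.length_eq_zero_iff.mp (by omega)
    subst this
    cases fuel' <;> simp [longestRun]
  | succ f ih =>
    intro ms fuel' h h'
    cases ms with
    | nil => cases fuel' <;> simp [longestRun]
    | cons m rest =>
      cases fuel' with
      | zero => simp at h'
      | succ f' =>
        simp only [longestRun]
        congr 1
        simp only [List.length_cons] at h h'
        apply ih
        · simp only [List.length_drop, List.length_cons]
          omega
        · simp only [List.length_drop, List.length_cons]
          omega

theorem LR_eq (ms : List Bool) :
    LR ms = if ms = [] then 0 else max (lead ms : Int) (LR (ms.drop (lead ms + 1))) := by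
  cases ms with
  | nil => simp [LR, longestRun]
  | cons m rest =>
    rw [if_neg (by simp)]
    show longestRun (rest.length + 1) (m :: rest) = _
    simp only [longestRun, lead, LR]
    congr 1
    apply longestRun_congr
    · simp only [List.length_drop, List.length_cons]; omega
    · exact le_refl _

theorem LR_nonneg (ms : List Bool) : 0 ≤ LR ms := by
  rw [LR_eq]
  split
  · exact le_refl 0
  · exact le_trans (Int.natCast_nonneg _) (le_max_left _ _)

theorem loopB_exit (ms : List Bool) (n i best : Int) (h : n < i) :
    ∀ (fuel : Nat), loopB fuel ms n i best = best := by
  intro fuel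
  cases fuel with
  | zero => rfl
  | succ f => simp only [loopB]; rw [if_neg (by omega)]

theorem findNext_eq (ms : List Bool) : ∀ (d i : Nat), i + d = ms.length →
    (((PySem.List.pyRange (i : Int) (ms.length : Int) 1).find?
        (fun t => !(PySem.List.pyGetD ms t true))).getD (ms.length : Int)) =
      (i : Int) + ((ms.drop i).findIdx (fun m => !m) : Int) := by
  intro d
  induction d with
  | zero =>
    intro i hi
    rw [PySem.List.pyRange_one_eq_nil (by omega)]
    simp [List.drop_eq_nil_of_le (by omega : ms.length ≤ i)]
    omega
  | succ d ih =>
    intro i hi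
    have hlt : i < ms.length := by omega
    rw [PySem.List.pyRange_one_cons (by exact_mod_cast hlt)]
    have hget : PySem.List.pyGetD ms (i : Int) true = ms[i] := by
      rw [PySem.List.pyGetD_eq_getElem _ _ (by omega) (by omega)]
      exact getElem_congr_idx (by omega)
    have hdropc : ms.drop i = ms[i] :: ms.drop (i + 1) := List.drop_eq_getElem_cons hlt
    cases hmi : ms[i] with
    | false =>
      rw [List.find?_cons_of_pos (by rw [hget, hmi]; rfl)]
      rw [hdropc, hmi]
      simp [List.findIdx_cons]
    | true =>
      rw [List.find?_cons_of_neg (by simp [hget, hmi])]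
      have hc : ((i : Int) + 1) = ((i + 1 : Nat) : Int) := by push_cast; ring
      rw [hc, ih (i + 1) (by omega)]
      rw [hdropc, hmi]
      simp only [List.findIdx_cons, Bool.not_true, cond_false]
      omega

theorem loopB_eq (ms : List Bool) : ∀ (fuel : Nat) (i : Nat) (best : Int),
    i ≤ ms.length → ms.length - i + 1 ≤ fuel →
    loopB fuel ms (ms.length : Int) (i : Int) best = max best (LR (ms.drop i)) := by
  intro fuel
  induction fuel with
  | zero => intro i best hi hf; omega
  | succ f ih =>
    intro i best hi hf
    simp only [loopB]
    rw [if_pos (by exact_mod_cast hi)]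
    have hk := findNext_eq ms (ms.length - i) i (by omega)
    rw [hk]
    have hkk : (i : Int) + ((ms.drop i).findIdx (fun m => !m) : Int) - i =
        ((ms.drop i).findIdx (fun m => !m) : Int) := by ring
    rw [hkk]
    have hL : (ms.drop i).findIdx (fun m => !m) ≤ (ms.drop i).length :=
      List.findIdx_le_length
    rw [List.length_drop] at hL
    by_cases hin : i + (ms.drop i).findIdx (fun m => !m) + 1 ≤ ms.length
    · have hc : (i : Int) + ((ms.drop i).findIdx (fun m => !m) : Int) + 1 =
          ((i + (ms.drop i).findIdx (fun m => !m) + 1 : Nat) : Int) := by push_cast; ring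
      rw [hc, ih _ _ hin (by omega)]
      have hdd : ms.drop (i + (ms.drop i).findIdx (fun m => !m) + 1) =
          (ms.drop i).drop ((ms.drop i).findIdx (fun m => !m) + 1) := by
        rw [List.drop_drop, Nat.add_assoc]
      rw [LR_eq (ms.drop i), if_neg (by
        intro h
        have := congrArg List.length h
        simp [List.length_drop] at this
        omega)]
      simp only [lead]
      rw [← hdd]
      rw [max_assoc]
    · rw [loopB_exit _ _ _ _ (by omega)]
      by_cases hieq : i = ms.length
      · have hnil : ms.drop i = [] := List.drop_eq_nil_of_le (by omega)
        rw [hnil]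
        have : ([] : List Bool).findIdx (fun m => !m) = 0 := rfl
        rw [this]
        have : LR ([] : List Bool) = 0 := rfl
        rw [this]
        norm_num
      · rw [LR_eq (ms.drop i), if_neg (by
          intro h
          have := congrArg List.length h
          simp [List.length_drop] at this
          omega)]
        simp only [lead]
        have hnil2 : (ms.drop i).drop ((ms.drop i).findIdx (fun m => !m) + 1) = [] := by
          apply List.drop_eq_nil_of_le
          rw [List.length_drop]
          omega
        rw [hnil2]
        have : LR ([] : List Bool) = 0 := rfl
        rw [this]
        rw [max_eq_left (Int.natCast_nonneg _)]

theorem foldl_stepA_eq (ms : List Bool) : ∀ (cnt ans : Int), 0 ≤ cnt → cnt ≤ ans →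
    (ms.foldl stepA (cnt, ans)).2 = max ans (maxRunFrom cnt ms) := by
  induction ms with
  | nil =>
    intro cnt ans h0 h1
    simp only [List.foldl_nil, maxRunFrom]
    rw [max_eq_left (by omega : (0:Int) ≤ ans)]
  | cons m ms ih =>
    intro cnt ans h0 h1
    cases m with
    | true =>
      simp only [List.foldl_cons, stepA, maxRunFrom]
      rw [ih (cnt + 1) (max ans (cnt + 1)) (by omega) (le_max_right _ _)]
      rw [max_assoc]
    | false =>
      simp only [List.foldl_cons, stepA, maxRunFrom]
      exact ih 0 ans (le_refl 0) (by omega)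

theorem maxRunFrom_eq (ms : List Bool) : ∀ (cnt : Int), 0 ≤ cnt →
    maxRunFrom cnt ms =
      if lead ms = 0 then LR ms
      else max (cnt + (lead ms : Int)) (LR (ms.drop (lead ms + 1))) := by
  induction ms with
  | nil => intro cnt h0; simp [maxRunFrom, lead, LR, longestRun]
  | cons m rest ih =>
    intro cnt h0
    cases m with
    | false =>
      have hl : lead (false :: rest) = 0 := by simp [lead, List.findIdx_cons]
      rw [if_pos hl]
      show maxRunFrom 0 rest = _
      rw [LR_eq, if_neg (by simp)]
      rw [hl]
      simp only [Nat.zero_add, List.drop_one, List.tail_cons, Nat.cast_zero]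
      have hmr : maxRunFrom 0 rest = LR rest := by
        rw [ih 0 (le_refl 0)]
        by_cases hr : lead rest = 0
        · rw [if_pos hr]
        · rw [if_neg hr]
          rw [LR_eq rest, if_neg (by intro h; subst h; simp [lead] at hr)]
          norm_num
      rw [hmr]
      exact (max_eq_right (LR_nonneg rest)).symm
    | true =>
      have hl : lead (true :: rest) = lead rest + 1 := by simp [lead, List.findIdx_cons]
      rw [if_neg (by omega)]
      show max (cnt + 1) (maxRunFrom (cnt + 1) rest) = _
      rw [ih (cnt + 1) (by omega)]
      rw [hl]
      have hdrop : (true :: rest).drop (lead rest + 1 + 1) = rest.drop (lead rest + 1) := by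
        rw [List.drop_succ_cons]
      rw [hdrop]
      by_cases hr : lead rest = 0
      · rw [if_pos hr, hr]
        have heq : LR rest = LR (rest.drop 1) := by
          cases rest with
          | nil => simp
          | cons b r =>
            cases b with
            | true => simp [lead, List.findIdx_cons] at hr
            | false =>
              rw [LR_eq (false :: r), if_neg (by simp)]
              have hl0 : lead (false :: r) = 0 := by simp [lead, List.findIdx_cons]
              rw [hl0]
              simp only [Nat.zero_add, List.drop_one, List.tail_cons, Nat.cast_zero]
              exact max_eq_right (LR_nonneg r)
        rw [heq]
        norm_num
      · rw [if_neg hr]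
        have hln : (1 : Int) ≤ (lead rest : Int) := by
          exact_mod_cast Nat.pos_of_ne_zero hr
        have hx := LR_nonneg (rest.drop (lead rest + 1))
        push_cast
        simp only [Int.max_def]
        split_ifs <;> omega

theorem maxRunFrom_zero (ms : List Bool) : maxRunFrom 0 ms = LR ms := by
  rw [maxRunFrom_eq ms 0 (le_refl 0)]
  by_cases hms : lead ms = 0
  · rw [if_pos hms]
  · rw [if_neg hms]
    rw [LR_eq ms, if_neg (by intro h; subst h; simp [lead] at hms)]
    norm_num

-- ===== VERDICT (by name: the statement is the Claim_ definition above) =====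
theorem temperatureTrend_spec : Claim_equal_temperatureTrend := by
  intro A B _ _
  unfold Spec_temperatureTrend temperatureTrend temperatureTrend_alt
  simp only []
  set ms := (PySem.List.pyRange 1 (A.length : Int) 1).map
    (fun i => decide (pySign (PySem.List.pyGetD A i 0 - PySem.List.pyGetD A (i - 1) 0) =
                      pySign (PySem.List.pyGetD B i 0 - PySem.List.pyGetD B (i - 1) 0))) with hms
  have halt : loopB (ms.length + 1) ms (ms.length : Int) 0 0 = LR ms := by
    have h := loopB_eq ms (ms.length + 1) 0 0 (Nat.zero_le _) (by omega)
    simpa [max_eq_right (LR_nonneg ms)] using h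
  rw [halt]
  have hfold : (PySem.List.pyRange 1 (A.length : Int) 1).foldl (fun (s : Int × Int) i =>
      if (PySem.List.pyGetD A i 0 - PySem.List.pyGetD A (i - 1) 0 =
            PySem.List.pyGetD B i 0 - PySem.List.pyGetD B (i - 1) 0 ∧
          PySem.List.pyGetD B i 0 - PySem.List.pyGetD B (i - 1) 0 = 0) ∨
         (PySem.List.pyGetD A i 0 - PySem.List.pyGetD A (i - 1) 0 > 0 ∧
          PySem.List.pyGetD B i 0 - PySem.List.pyGetD B (i - 1) 0 > 0) ∨
         (PySem.List.pyGetD A i 0 - PySem.List.pyGetD A (i - 1) 0 < 0 ∧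
          PySem.List.pyGetD B i 0 - PySem.List.pyGetD B (i - 1) 0 < 0)
      then (s.1 + 1, max s.2 (s.1 + 1))
      else (0, s.2)) ((0 : Int), (0 : Int)) = ms.foldl stepA ((0 : Int), (0 : Int)) := by
    rw [hms, List.foldl_map]
    apply PySem.List.foldl_congr_mem
    intro s i _
    by_cases hc : pySign (PySem.List.pyGetD A i 0 - PySem.List.pyGetD A (i - 1) 0) =
        pySign (PySem.List.pyGetD B i 0 - PySem.List.pyGetD B (i - 1) 0)
    · rw [if_pos ((cond_iff_sign _ _).mpr hc)]
      simp [stepA, hc]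
    · rw [if_neg (fun h => hc ((cond_iff_sign _ _).mp h))]
      simp [stepA, hc]
  rw [hfold, foldl_stepA_eq ms 0 0 (le_refl 0) (le_refl 0), maxRunFrom_zero]
  have := LR_nonneg ms
  omega
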